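-- pv_equiv track=rewrite | github.com/aniketk33/LeetcodeSolutions | amazon-oa-30th-aug.py | get_max_points_2
-- ===== SOURCE A (Python) =====
-- from collections import deque
--
-- def get_max_points_2(days, k):
--     if k == 0:
--         return 0
--
--     # to create a cyclic nature of the sprint, add the first value to the end
--     days.append(days[0])
--
--     curr_queue = deque()
--     max_points = 0
--     curr_points = 0
--
--     for i in days:
--         for j in range(1, i + 1):
--             if len(curr_queue) < k:
--                 curr_points += j
--                 curr_queue.append(j)
--             else:
--                 curr_points -= curr_queue.popleft()
--                 curr_points += j
--                 curr_queue.append(j)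
--
--             max_points = max(max_points, curr_points)
--
--     return max_points
-- ===== SOURCE B (Python) =====
-- def get_max_points_2(days, k):
--     if k == 0:
--         return 0
--     # same cyclic extension; B does not mutate the input list
--     stream = [j for d in days + [days[0]] for j in range(1, d + 1)]
--     prefix = [0]
--     acc = 0
--     for v in stream:
--         acc += v
--         prefix.append(acc)
--     best = 0
--     for t in range(1, len(stream) + 1):
--         s = prefix[t] - prefix[max(0, t - k)]
--         if s > best:
--             best = s
--     return best
-- ===== Notes on version B (the rewrite author's own statement) =====
-- stated objective: alternative
-- what changed: A simulates the sliding window element by element with a deque and a running sum; B materialises the ramp stream once, builds a prefix-sum array, and takes the max of the prefix-difference window sums directly, with no queue state.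
import Mathlib
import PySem

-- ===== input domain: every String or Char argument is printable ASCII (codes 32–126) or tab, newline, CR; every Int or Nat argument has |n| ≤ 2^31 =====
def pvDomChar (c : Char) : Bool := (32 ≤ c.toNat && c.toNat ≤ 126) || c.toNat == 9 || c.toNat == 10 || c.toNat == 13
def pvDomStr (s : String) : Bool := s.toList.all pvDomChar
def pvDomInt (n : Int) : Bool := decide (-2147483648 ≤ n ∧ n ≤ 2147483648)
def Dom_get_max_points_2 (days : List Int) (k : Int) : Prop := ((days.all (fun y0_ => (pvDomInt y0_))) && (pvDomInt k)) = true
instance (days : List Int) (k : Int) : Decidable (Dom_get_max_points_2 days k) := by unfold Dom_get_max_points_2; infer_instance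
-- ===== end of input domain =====

-- B replaces A's element-by-element deque sliding window by prefix sums of the
-- concatenated ramp stream and a direct max over the prefix-difference window sums
-- (objective: alternative).  Note: A mutates its argument (days.append(days[0]));
-- B does not mutate the input list — the equivalence proved here is about the return value.

-- ===== PORT A =====
-- one iteration of A's inner loop body: state = (curr_queue, curr_points, max_points)
def pvStepA (k : Int) (st : List Int × Int × Int) (j : Int) : List Int × Int × Int :=
  if (st.1.length : Int) < k then
    (st.1 ++ [j], st.2.1 + j, max st.2.2 (st.2.1 + j))
  else
    -- curr_queue.popleft(): on an empty queue Python raises IndexError (outside Pre_); headD 0 there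
    (st.1.tail ++ [j], st.2.1 - st.1.headD 0 + j, max st.2.2 (st.2.1 - st.1.headD 0 + j))

-- "for j in range(1, i + 1): …"
def pvDayA (k : Int) (st : List Int × Int × Int) (i : Int) : List Int × Int × Int :=
  (PySem.List.pyRange 1 (i + 1) 1).foldl (pvStepA k) st

def get_max_points_2 (days : List Int) (k : Int) : Int :=
  if k = 0 then 0
  else
    -- days.append(days[0]): days[0] raises IndexError on [] (outside Pre_); getD 0 there
    ((days ++ [(PySem.List.pyGet? days 0).getD 0]).foldl (pvDayA k) ([], 0, 0)).2.2

-- ===== PORT B =====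
-- "s = prefix[t] - prefix[max(0, t - k)]": both indices are nonnegative and in range for
-- every admitted input (getD 0 where Python would raise IndexError, outside Pre_);
-- Python's list is O(1) append/index, so the port keeps prefix as an Array
def pvWinS (pfx : Array Int) (k t : Int) : Int :=
  (pfx[t.toNat]?).getD 0 - (pfx[(max 0 (t - k)).toNat]?).getD 0

-- "if s > best: best = s"
def pvBestStep (pfx : Array Int) (k : Int) (best t : Int) : Int :=
  if best < pvWinS pfx k t then pvWinS pfx k t else best

-- "stream = [j for d in days + [days[0]] for j in range(1, d + 1)]" (days[0] on []: outside Pre_)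
def pvStream (days : List Int) : List Int :=
  (days ++ [(PySem.List.pyGet? days 0).getD 0]).flatMap (fun d => PySem.List.pyRange 1 (d + 1) 1)

-- "prefix = [0]; acc = 0; for v in stream: acc += v; prefix.append(acc)"
def pvPrefix (stream : List Int) : Array Int :=
  (stream.foldl (fun (st : Array Int × Int) v => (st.1.push (st.2 + v), st.2 + v)) (#[0], 0)).1

def get_max_points_2_alt (days : List Int) (k : Int) : Int :=
  if k = 0 then 0
  else
    (PySem.List.pyRange 1 (((pvStream days).length : Int) + 1) 1).foldl
      (pvBestStep (pvPrefix (pvStream days)) k) 0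

-- ===== PRECONDITION & SPEC =====
-- Pre_ excludes exactly the inputs where A raises IndexError: days = [] with k ≠ 0
-- (days[0] fails), and k < 0 with some positive day (popleft from an empty deque).
def Pre_get_max_points_2 (days : List Int) (k : Int) : Prop :=
  k = 0 ∨ (days ≠ [] ∧ (1 ≤ k ∨ ∀ d ∈ days, d ≤ 0))
instance (days : List Int) (k : Int) : Decidable (Pre_get_max_points_2 days k) := by
  unfold Pre_get_max_points_2; infer_instance

def pvWitness_get_max_points_2 : List Int × Int := ([3, 1, 2], 2)

def Spec_get_max_points_2 (days : List Int) (k : Int) (out : Int) : Prop := out = get_max_points_2_alt days k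
instance (days : List Int) (k : Int) (out : Int) : Decidable (Spec_get_max_points_2 days k out) := by unfold Spec_get_max_points_2; infer_instance

-- ===== CLAIM (what is proved, stated in full; the proofs are below) =====
def Claim_equal_get_max_points_2 : Prop := ∀ (days : List Int) (k : Int), Dom_get_max_points_2 days k → Pre_get_max_points_2 days k → Spec_get_max_points_2 days k (get_max_points_2 days k)

-- ===== LEMMAS AND PROOFS =====

-- the window sum ending at position t of xs (last min(t,K) elements of the first t)
def pvWin (K : Nat) (xs : List Int) (t : Nat) : Int :=
  (xs.take t).sum - (xs.take (t - K)).sum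

-- max of 0 and all window sums: the common characterization of both programs
def pvMaxW (K : Nat) (xs : List Int) : Int :=
  (List.range xs.length).foldl (fun m t => max m (pvWin K xs (t + 1))) 0

-- A's loop state after consuming the stream prefix ys
def pvStA (K : Nat) (ys : List Int) : List Int × Int × Int :=
  (ys.drop (ys.length - K), (ys.drop (ys.length - K)).sum, pvMaxW K ys)

-- B's prefix-sum list of ys
def pvP (ys : List Int) : List Int :=
  (List.range (ys.length + 1)).map (fun t => (ys.take t).sum)

lemma pvSum_drop (zs : List Int) (m : Nat) :
    (zs.drop m).sum = zs.sum - (zs.take m).sum := by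
  have h := congrArg List.sum (List.take_append_drop m zs)
  rw [List.sum_append] at h
  omega

lemma pvWin_last (K : Nat) (zs : List Int) :
    pvWin K zs zs.length = (zs.drop (zs.length - K)).sum := by
  unfold pvWin
  rw [List.take_length, pvSum_drop]

lemma pvWin_prefix (K : Nat) (ys : List Int) (j : Int) (t : Nat) (ht : t ≤ ys.length) :
    pvWin K (ys ++ [j]) t = pvWin K ys t := by
  unfold pvWin
  rw [List.take_append_of_le_length ht,
      List.take_append_of_le_length (le_trans (Nat.sub_le _ _) ht)]

lemma pvMaxW_snoc (K : Nat) (ys : List Int) (j : Int) :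
    pvMaxW K (ys ++ [j]) =
      max (pvMaxW K ys) (((ys ++ [j]).drop (ys.length + 1 - K)).sum) := by
  unfold pvMaxW
  rw [List.length_append, List.length_cons, List.length_nil, List.range_succ,
      List.foldl_append]
  have hcongr : (List.range ys.length).foldl
      (fun m t => max m (pvWin K (ys ++ [j]) (t + 1))) 0
      = (List.range ys.length).foldl (fun m t => max m (pvWin K ys (t + 1))) 0 := by
    apply PySem.List.foldl_congr_mem
    intro acc t ht
    rw [pvWin_prefix K ys j (t + 1) (by exact List.mem_range.mp ht)]
  rw [hcongr]
  have hlast : pvWin K (ys ++ [j]) (ys.length + 1)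
      = ((ys ++ [j]).drop (ys.length + 1 - K)).sum := by
    have := pvWin_last K (ys ++ [j])
    simpa [List.length_append] using this
  simp [hlast]

lemma pvStep_snoc (K : Nat) (hK : 1 ≤ K) (ys : List Int) (j : Int) :
    pvStepA (K : Int) (pvStA K ys) j = pvStA K (ys ++ [j]) := by
  unfold pvStepA pvStA
  rcases Nat.lt_or_ge ys.length K with hlt | hge
  · -- queue not yet full: len(ys) < K
    have h0 : ys.length - K = 0 := by omega
    have h1 : ys.length + 1 - K = 0 := by omega
    have hlen2 : (ys ++ [j]).length - K = 0 := by
      rw [List.length_append]; simp; omega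
    have hcond : ((ys.drop (ys.length - K)).length : Int) < (K : Int) := by
      rw [List.length_drop]; exact_mod_cast by omega
    rw [if_pos hcond, pvMaxW_snoc K ys j, h0, h1, hlen2]
    simp [List.sum_append]
  · -- queue full: pop the head
    have hlen : (ys.drop (ys.length - K)).length = K := by
      rw [List.length_drop]; omega
    have hcond : ¬ (((ys.drop (ys.length - K)).length : Int) < (K : Int)) := by
      rw [hlen]; omega
    have hs : ys.length + 1 - K = (ys.length - K) + 1 := by omega
    have hdropped : (ys ++ [j]).drop (ys.length + 1 - K)
        = (ys.drop (ys.length - K)).tail ++ [j] := by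
      rw [List.tail_drop, hs, List.drop_append_of_le_length (by omega)]
    obtain ⟨a, t, hq⟩ : ∃ a t, ys.drop (ys.length - K) = a :: t := by
      rcases h : ys.drop (ys.length - K) with _ | ⟨a, t⟩
      · exfalso; rw [h] at hlen; simp at hlen; omega
      · exact ⟨a, t, rfl⟩
    have hlen2 : (ys ++ [j]).length - K = ys.length + 1 - K := by simp
    rw [if_neg hcond, pvMaxW_snoc K ys j, hlen2, hdropped, hq]
    simp [List.sum_append]

lemma pvFoldA (K : Nat) (hK : 1 ≤ K) (xs : List Int) :
    ∀ ys, xs.foldl (pvStepA (K : Int)) (pvStA K ys) = pvStA K (ys ++ xs) := by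
  induction xs with
  | nil => intro ys; simp
  | cons x xs ih =>
      intro ys
      rw [List.foldl_cons, pvStep_snoc K hK ys x, ih (ys ++ [x])]
      simp

lemma pvStA_nil (K : Nat) : pvStA K [] = ([], 0, 0) := by
  simp [pvStA, pvMaxW]

-- A's loop computes pvMaxW of the concatenated ramp stream
lemma pvA_eq (K : Nat) (hK : 1 ≤ K) (ds : List Int) :
    (ds.foldl (pvDayA (K : Int)) ([], 0, 0)).2.2
      = pvMaxW K (ds.flatMap (fun d => PySem.List.pyRange 1 (d + 1) 1)) := by
  have h : ds.foldl (pvDayA (K : Int)) ([], 0, 0)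
      = (ds.flatMap (fun d => PySem.List.pyRange 1 (d + 1) 1)).foldl
          (pvStepA (K : Int)) ([], 0, 0) := by
    rw [List.foldl_flatMap]; rfl
  rw [h, ← pvStA_nil K, pvFoldA K hK _ [], List.nil_append, pvStA]

lemma pvP_nil : pvP [] = [0] := by simp [pvP]

lemma pvP_snoc (ys : List Int) (v : Int) :
    pvP (ys ++ [v]) = pvP ys ++ [ys.sum + v] := by
  unfold pvP
  rw [List.length_append, List.length_cons, List.length_nil, List.range_succ,
      List.map_append]
  congr 1
  · apply List.map_congr_left
    intro t ht
    have ht' : t ≤ ys.length := Nat.lt_succ_iff.mp (List.mem_range.mp ht)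
    rw [List.take_append_of_le_length ht']
  · simp

lemma pvPfxFold (xs : List Int) :
    ∀ ys, xs.foldl (fun (st : Array Int × Int) v => (st.1.push (st.2 + v), st.2 + v))
        ((pvP ys).toArray, ys.sum) = ((pvP (ys ++ xs)).toArray, (ys ++ xs).sum) := by
  induction xs with
  | nil => intro ys; simp
  | cons x xs ih =>
      intro ys
      rw [List.foldl_cons]
      have hst : (((pvP ys).toArray, ys.sum) : Array Int × Int).1.push
            ((((pvP ys).toArray, ys.sum) : Array Int × Int).2 + x)
          = (pvP (ys ++ [x])).toArray := by
        rw [List.push_toArray, pvP_snoc]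
      have hsum : (((pvP ys).toArray, ys.sum) : Array Int × Int).2 + x = (ys ++ [x]).sum := by simp
      rw [hst, hsum, ih (ys ++ [x])]
      simp

lemma pvP_get (ys : List Int) (m : Nat) (hm : m ≤ ys.length) :
    (pvP ys)[m]? = some ((ys.take m).sum) := by
  unfold pvP
  rw [List.getElem?_map, List.getElem?_range (by omega)]
  rfl

-- B's second loop computes pvMaxW of the stream
lemma pvB_eq (K : Nat) (hK : 1 ≤ K) (xs : List Int) :
    (PySem.List.pyRange 1 ((xs.length : Int) + 1) 1).foldl (pvBestStep (pvP xs).toArray (K : Int)) 0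
      = pvMaxW K xs := by
  rw [PySem.List.pyRange_one]
  have hn : (((xs.length : Int) + 1) - 1).toNat = xs.length := by omega
  rw [hn, List.foldl_map]
  unfold pvMaxW
  apply PySem.List.foldl_congr_mem
  intro acc t ht
  have htn : t < xs.length := List.mem_range.mp ht
  unfold pvBestStep pvWinS
  have h1 : ((1 : Int) + (t : Int)).toNat = t + 1 := by omega
  have h2 : (max 0 ((1 : Int) + (t : Int) - (K : Int))).toNat = (t + 1) - K := by omega
  rw [h1, h2, List.getElem?_toArray, List.getElem?_toArray,
      pvP_get xs (t + 1) (by omega), pvP_get xs (t + 1 - K) (by omega)]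
  simp only [Option.getD_some]
  unfold pvWin
  rcases lt_or_ge acc ((xs.take (t + 1)).sum - (xs.take (t + 1 - K)).sum) with h | h
  · rw [if_pos h, max_eq_right (le_of_lt h)]
  · rw [if_neg (not_lt.mpr h), max_eq_left h]

-- degenerate nonpositive-ramp lemmas (k < 0 but all days ≤ 0: the stream is empty)
lemma pvRamp_nil (d : Int) (hd : d ≤ 0) : PySem.List.pyRange 1 (d + 1) 1 = [] :=
  PySem.List.pyRange_one_eq_nil (by omega)

lemma pvFold_id {α β : Type} (f : α → β → α) :
    ∀ (l : List β) (init : α), (∀ x ∈ l, ∀ st, f st x = st) → l.foldl f init = init := by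
  intro l
  induction l with
  | nil => intro init _; rfl
  | cons x xs ih =>
      intro init h
      rw [List.foldl_cons, h x (by simp)]
      exact ih init (fun y hy st => h y (List.mem_cons_of_mem x hy) st)

theorem pv_main (days : List Int) (k : Int) (hpre : Pre_get_max_points_2 days k) :
    get_max_points_2 days k = get_max_points_2_alt days k := by
  by_cases hk0 : k = 0
  · simp [get_max_points_2, get_max_points_2_alt, hk0]
  · unfold get_max_points_2 get_max_points_2_alt
    rw [if_neg hk0, if_neg hk0]
    rcases hpre with hk0' | ⟨hne, hrest⟩
    · exact absurd hk0' hk0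
    have hx : (days ++ [(PySem.List.pyGet? days 0).getD 0]).flatMap
        (fun d => PySem.List.pyRange 1 (d + 1) 1) = pvStream days := rfl
    rcases hrest with hk1 | hall
    · -- main case: k ≥ 1
      have hkK : k = ((k.toNat : Nat) : Int) := by omega
      have hK1 : 1 ≤ k.toNat := by omega
      have hpfx : pvPrefix (pvStream days) = (pvP (pvStream days)).toArray := by
        unfold pvPrefix
        have h0 : ((#[0], (0 : Int)) : Array Int × Int) = ((pvP []).toArray, ([] : List Int).sum) := by
          rw [pvP_nil]; simp
        rw [h0, pvPfxFold (pvStream days) []]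
        simp
      rw [hkK, pvA_eq k.toNat hK1, hx, hpfx]
      exact (pvB_eq k.toNat hK1 (pvStream days)).symm
    · -- k < 0: Pre_ gives all days ≤ 0, every ramp is empty, both loops are vacuous
      have hall' : ∀ d ∈ days ++ [(PySem.List.pyGet? days 0).getD 0], d ≤ 0 := by
        intro d hd
        rcases List.mem_append.mp hd with h | h
        · exact hall d h
        · rcases days with _ | ⟨a, rest⟩
          · exact absurd rfl hne
          · simp at h
            rw [h]
            exact hall a (by simp)
      have hstream_nil : pvStream days = [] := by
        rw [← hx]
        apply List.flatMap_eq_nil_iff.mpr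
        intro d hd
        exact pvRamp_nil d (hall' d hd)
      have hA : (days ++ [(PySem.List.pyGet? days 0).getD 0]).foldl (pvDayA k) ([], 0, 0)
          = ([], 0, 0) := by
        apply pvFold_id
        intro d hd st
        unfold pvDayA
        rw [pvRamp_nil d (hall' d hd)]
        rfl
      rw [hA, hstream_nil]
      simp

-- ===== VERDICT (by name: the statement is the Claim_ definition above) =====
theorem get_max_points_2_spec : Claim_equal_get_max_points_2 := by
  intro days k _ hpre
  unfold Spec_get_max_points_2
  exact pv_main days k hpre
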